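-- pv_equiv track=rewrite | github.com/DWE-CLOUD/NoLess | noless/code_metrics.py | _find_duplicated_lines
-- ===== SOURCE A (Python) =====
-- def _find_duplicated_lines(code: str) -> int:
--     """Find duplicated code segments (simple check)."""
--     lines = code.split("\n")
--     cleaned = [
--         line.strip()
--         for line in lines
--         if line.strip() and not line.strip().startswith("#")
--     ]
--
--     duplicates = 0
--     seen = set()
--     for line in cleaned:
--         if line in seen:
--             duplicates += 1
--         seen.add(line)
--
--     return duplicates
-- ===== SOURCE B (Python) =====
-- def _find_duplicated_lines(code: str) -> int:
--     """Find duplicated code segments (simple check)."""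
--     cleaned = [
--         line.strip()
--         for line in code.split("\n")
--         if line.strip() and not line.strip().startswith("#")
--     ]
--     ordered = sorted(cleaned)
--     return sum(1 for a, b in zip(ordered, ordered[1:]) if a == b)
-- ===== Notes on version B (the rewrite author's own statement) =====
-- stated objective: alternative
-- what changed: Replaced the streaming seen-set loop by sort-then-scan: sort the cleaned lines so equal lines become adjacent, then count adjacent equal pairs, which equals total minus distinct.
import Mathlib
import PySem

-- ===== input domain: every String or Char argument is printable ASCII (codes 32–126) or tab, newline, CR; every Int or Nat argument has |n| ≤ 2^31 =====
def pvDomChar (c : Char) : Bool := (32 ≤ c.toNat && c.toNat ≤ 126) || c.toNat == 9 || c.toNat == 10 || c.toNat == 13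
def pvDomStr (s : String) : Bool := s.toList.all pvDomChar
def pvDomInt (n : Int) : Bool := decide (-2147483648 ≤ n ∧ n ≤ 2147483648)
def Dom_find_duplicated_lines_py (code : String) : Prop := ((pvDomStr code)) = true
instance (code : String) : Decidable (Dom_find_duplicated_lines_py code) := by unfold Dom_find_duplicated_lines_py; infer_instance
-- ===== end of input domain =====

-- B replaces A's streaming seen-set loop by a sort-then-scan: sort the cleaned lines so equal
-- lines become adjacent, then count adjacent equal pairs (alternative decomposition).

-- ===== PORT A =====
def find_duplicated_lines_py (code : String) : Int :=
  let lines := (PySem.Str.split? code "\n").getD []  -- sep "\n" ≠ "": split? is always `some` here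
  let cleaned := (lines.filter (fun line =>
      (PySem.Str.strip line != "") && !(PySem.Str.startswith (PySem.Str.strip line) "#"))).map
      (fun line => PySem.Str.strip line)
  -- duplicates = 0; seen = set(); for line in cleaned: …
  let st := cleaned.foldl
      (fun (st : Int × PySem.Set String) line =>
        ((if PySem.Set.contains st.2 line then st.1 + 1 else st.1), PySem.Set.add st.2 line))
      (0, PySem.Set.empty)
  st.1

-- ===== PORT B =====
def find_duplicated_lines_py_alt (code : String) : Int :=
  let cleaned := (((PySem.Str.split? code "\n").getD []).filter (fun line =>
      (PySem.Str.strip line != "") && !(PySem.Str.startswith (PySem.Str.strip line) "#"))).map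
      (fun line => PySem.Str.strip line)
  -- ordered = sorted(cleaned)
  let ordered := PySem.List.sorted cleaned (fun x => x) false
  -- sum(1 for a, b in zip(ordered, ordered[1:]) if a == b)
  (ordered.zip (PySem.List.slice ordered (some 1) none)).foldl
      (fun acc p => if p.1 == p.2 then acc + 1 else acc) 0

-- ===== PRECONDITION & SPEC =====
def Spec_find_duplicated_lines_py (code : String) (out : Int) : Prop := out = find_duplicated_lines_py_alt code
instance (code : String) (out : Int) : Decidable (Spec_find_duplicated_lines_py code out) := by unfold Spec_find_duplicated_lines_py; infer_instance

-- ===== CLAIM (what is proved, stated in full; the proofs are below) =====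
def Claim_equal_find_duplicated_lines_py : Prop := ∀ (code : String), Dom_find_duplicated_lines_py code → Spec_find_duplicated_lines_py code (find_duplicated_lines_py code)

-- ===== LEMMAS AND PROOFS =====

-- A's loop: the duplicate counter equals (elements processed) minus (new distinct elements added).
theorem pv_A_loop (xs : List String) (s : PySem.Set String) (d : Int) :
    (xs.foldl
      (fun (st : Int × PySem.Set String) line =>
        ((if PySem.Set.contains st.2 line then st.1 + 1 else st.1), PySem.Set.add st.2 line))
      (d, s)).1
      = d + xs.length - (((PySem.Set.update s xs).length : Int) - s.length) := by
  induction xs generalizing s d with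
  | nil => simp [PySem.Set.update]
  | cons x t ih =>
    simp only [List.foldl_cons]
    by_cases h : PySem.Set.contains s x
    · have hx : x ∈ s := by simpa [PySem.Set.contains] using h
      have hadd : PySem.Set.add s x = s := by simp [PySem.Set.add, PySem.Set.contains, hx]
      rw [h]
      simp only [if_true, hadd]
      rw [ih]
      have hu : PySem.Set.update s (x :: t) = PySem.Set.update s t := by
        simp [PySem.Set.update, hadd]
      rw [hu]
      simp only [List.length_cons]
      push_cast
      ring
    · have hx : x ∉ s := by simpa [PySem.Set.contains] using h
      have hb : PySem.Set.contains s x = false := by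
        simpa [PySem.Set.contains] using hx
      have hadd : PySem.Set.add s x = s ++ [x] := by
        simp [PySem.Set.add, PySem.Set.contains, hx]
      rw [hb]
      simp only [Bool.false_eq_true, if_false]
      rw [ih]
      have hupd : PySem.Set.update s (x :: t) = PySem.Set.update (PySem.Set.add s x) t := by
        simp [PySem.Set.update]
      rw [hupd, hadd]
      have hlen : ((s ++ [x]).length : Int) = (s.length : Int) + 1 := by simp
      rw [hlen]
      simp only [List.length_cons]
      push_cast
      ring

-- Set.ofList xs is a permutation of xs.dedup (both nodup, same members).
theorem pv_ofList_perm_dedup (xs : List String) :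
    (PySem.Set.ofList xs).Perm xs.dedup := by
  apply List.perm_of_nodup_nodup_toFinset_eq (PySem.Set.nodup_ofList xs) xs.nodup_dedup
  ext a
  simp [PySem.Set.mem_ofList]

-- On a ≤-chain, the number of adjacent equal pairs is length minus the number of distinct elements.
theorem pv_adj_eq (s : List String) (h : s.Pairwise (· ≤ ·)) :
    (s.zip s.tail).countP (fun p => p.1 == p.2) + s.dedup.length = s.length := by
  induction s with
  | nil => simp
  | cons x t ih =>
    cases t with
    | nil => simp
    | cons y u =>
      have hpt : (y :: u).Pairwise (· ≤ ·) := h.tail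
      have hx : ∀ z ∈ y :: u, x ≤ z := fun z hz => (List.pairwise_cons.1 h).1 z hz
      have ihv := ih hpt
      simp only [List.tail_cons, List.zip_cons_cons, List.countP_cons, List.length_cons] at ihv ⊢
      by_cases hxy : x = y
      · have hmem : x ∈ y :: u := by simp [hxy]
        rw [List.dedup_cons_of_mem hmem]
        subst hxy
        simp only [beq_self_eq_true, if_true]
        omega
      · have hmem : x ∉ y :: u := by
          intro hm
          rcases List.mem_cons.1 hm with h1 | h2
          · exact hxy h1
          · exact hxy (le_antisymm (hx y (by simp)) ((List.pairwise_cons.1 hpt).1 x h2))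
        rw [List.dedup_cons_of_notMem hmem]
        have hne : ((x == y) = false) := by simp [hxy]
        simp only [hne, Bool.false_eq_true, if_false, List.length_cons]
        omega

-- The core equivalence, over an arbitrary list of (already cleaned) lines.
theorem pv_core (xs : List String) :
    (xs.foldl
      (fun (st : Int × PySem.Set String) line =>
        ((if PySem.Set.contains st.2 line then st.1 + 1 else st.1), PySem.Set.add st.2 line))
      (0, PySem.Set.empty)).1
    = ((PySem.List.sorted xs (fun x => x) false).zip
        (PySem.List.slice (PySem.List.sorted xs (fun x => x) false) (some 1) none)).foldl
        (fun acc p => if p.1 == p.2 then acc + 1 else acc) (0 : Int) := by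
  set s := PySem.List.sorted xs (fun x => x) false with hs
  rw [PySem.List.slice_from_one, PySem.List.foldl_if_add_one, pv_A_loop]
  have hpair : s.Pairwise (· ≤ ·) := by
    simpa using PySem.List.sorted_pairwise xs (fun x => x)
  have hperm : s.Perm xs := PySem.List.sorted_perm xs (fun x => x) false
  have hded : s.dedup.length = xs.dedup.length := (hperm.dedup).length_eq
  have hadj := pv_adj_eq s hpair
  have hupd : PySem.Set.update PySem.Set.empty xs = PySem.Set.ofList xs := by
    simp [PySem.Set.update, PySem.Set.ofList_eq_foldl, PySem.Set.empty]
  rw [hupd]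
  have hof : (PySem.Set.ofList xs).length = xs.dedup.length :=
    (pv_ofList_perm_dedup xs).length_eq
  have hlen : s.length = xs.length := hperm.length_eq
  simp only [PySem.Set.empty, List.length_nil]
  omega

-- ===== VERDICT (by name: the statement is the Claim_ definition above) =====
theorem find_duplicated_lines_py_spec : Claim_equal_find_duplicated_lines_py := by
  intro code _
  unfold Spec_find_duplicated_lines_py find_duplicated_lines_py find_duplicated_lines_py_alt
  exact pv_core _
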